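-- pv_equiv track=rewrite | github.com/kirya174/JB_course_Matrix_Processors | Topics/Declaring a function/Make the function work/main.py | closest_higher_mod_5
-- ===== SOURCE A (Python) =====
-- def closest_higher_mod_5(x):
--     remainder = x % 5
--     if remainder == 0:
--         return x
--     while True:
--         x += 1
--         if x % 5 == 0:
--             return x
--     return "I don't know :("
-- ===== SOURCE B (Python) =====
-- def closest_higher_mod_5(x):
--     r = x % 5
--     return x if r == 0 else x + (5 - r)
-- ===== Notes on version B (the rewrite author's own statement) =====
-- stated objective: simpler
-- what changed: Replaces the increment-until-divisible loop with a direct closed-form: r = x % 5, return x if r == 0 else x + (5 - r).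
import Mathlib
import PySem

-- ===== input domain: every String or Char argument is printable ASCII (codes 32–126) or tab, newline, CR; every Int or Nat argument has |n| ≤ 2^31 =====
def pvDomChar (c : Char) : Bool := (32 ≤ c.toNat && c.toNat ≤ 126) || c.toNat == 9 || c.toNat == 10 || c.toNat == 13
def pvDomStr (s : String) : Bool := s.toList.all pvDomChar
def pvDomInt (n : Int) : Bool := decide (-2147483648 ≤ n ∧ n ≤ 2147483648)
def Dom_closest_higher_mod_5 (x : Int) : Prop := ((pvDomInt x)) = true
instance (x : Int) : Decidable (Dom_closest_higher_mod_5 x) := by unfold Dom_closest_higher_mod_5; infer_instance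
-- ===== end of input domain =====

-- B replaces A's increment-until-divisible loop with the closed form x + (5 - x % 5); equal on all ints.

-- ===== PORT A =====
-- the 'while True: x += 1; if x % 5 == 0: return x' loop; fuel 5 is a totality
-- guard only (one of x+1..x+5 is divisible by 5, so the 0 case is never reached)
def pvLoopA : Nat → Int → Int
  | 0, x => x
  | Nat.succ n, x =>
    if PySem.Int.mod (x + 1) 5 = 0 then x + 1 else pvLoopA n (x + 1)

def closest_higher_mod_5 (x : Int) : Int :=
  let remainder := PySem.Int.mod x 5
  if remainder = 0 then x
  else pvLoopA 5 x

-- ===== PORT B =====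
def closest_higher_mod_5_alt (x : Int) : Int :=
  let r := PySem.Int.mod x 5
  if r = 0 then x else x + (5 - r)

-- ===== PRECONDITION & SPEC =====
def Spec_closest_higher_mod_5 (x : Int) (out : Int) : Prop := out = closest_higher_mod_5_alt x
instance (x : Int) (out : Int) : Decidable (Spec_closest_higher_mod_5 x out) := by unfold Spec_closest_higher_mod_5; infer_instance

-- ===== CLAIM (what is proved, stated in full; the proofs are below) =====
def Claim_equal_closest_higher_mod_5 : Prop := ∀ (x : Int), Dom_closest_higher_mod_5 x → Spec_closest_higher_mod_5 x (closest_higher_mod_5 x)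

-- ===== LEMMAS AND PROOFS =====

-- the loop reaches the next multiple of 5: if x % 5 ≠ 0 then pvLoopA x = x + (5 - x % 5)
theorem pvLoopA_eq (x : Int) (h : PySem.Int.mod x 5 ≠ 0) :
    pvLoopA 5 x = x + (5 - PySem.Int.mod x 5) := by
  have h1 := PySem.Int.mod_nonneg x (by omega : (0:Int) < 5)
  have h2 := PySem.Int.mod_lt x (by omega : (0:Int) < 5)
  have e1 := PySem.Int.floordiv_mul_add_mod x 5
  have hm : PySem.Int.mod x 5 = 1 ∨ PySem.Int.mod x 5 = 2 ∨ PySem.Int.mod x 5 = 3 ∨ PySem.Int.mod x 5 = 4 := by omega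
  -- mod of successor
  have step : ∀ y : Int, PySem.Int.mod (y + 1) 5 =
      (if PySem.Int.mod y 5 = 4 then 0 else PySem.Int.mod y 5 + 1) := by
    intro y
    have a1 := PySem.Int.mod_nonneg y (by omega : (0:Int) < 5)
    have a2 := PySem.Int.mod_lt y (by omega : (0:Int) < 5)
    have b1 := PySem.Int.mod_nonneg (y + 1) (by omega : (0:Int) < 5)
    have b2 := PySem.Int.mod_lt (y + 1) (by omega : (0:Int) < 5)
    have c1 := PySem.Int.floordiv_mul_add_mod y 5
    have c2 := PySem.Int.floordiv_mul_add_mod (y + 1) 5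
    split_ifs with h4 <;> omega
  rcases hm with h4 | h3 | h2' | h1'
  · rw [pvLoopA]; simp only [step x, h4]
    rw [pvLoopA]; simp only [step (x+1), step x, h4]
    rw [pvLoopA]; simp only [step (x+1+1), step (x+1), step x, h4]
    rw [pvLoopA]; simp only [step (x+1+1+1), step (x+1+1), step (x+1), step x, h4]
    norm_num
    omega
  · rw [pvLoopA]; simp only [step x, h3]
    rw [pvLoopA]; simp only [step (x+1), step x, h3]
    rw [pvLoopA]; simp only [step (x+1+1), step (x+1), step x, h3]
    norm_num
    omega
  · rw [pvLoopA]; simp only [step x, h2']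
    rw [pvLoopA]; simp only [step (x+1), step x, h2']
    norm_num
    omega
  · rw [pvLoopA]; simp only [step x, h1']
    norm_num

-- ===== VERDICT (by name: the statement is the Claim_ definition above) =====
theorem closest_higher_mod_5_spec : Claim_equal_closest_higher_mod_5 := by
  intro x _
  unfold Spec_closest_higher_mod_5
  simp only [closest_higher_mod_5, closest_higher_mod_5_alt]
  split_ifs with h
  · rfl
  · exact pvLoopA_eq x h
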